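-- pv_equiv track=rewrite | github.com/mindspore-ai/mindspore | mindspore/python/mindspore/profiler/common/util.py | get_newest_file
-- ===== SOURCE A (Python) =====
-- def get_newest_file(file_list):
--     """
--     Find the newest files
--     :param file_list:
--     :return:
--     """
--     newest_file_list = []
--     newest_timestamp = '0'
--     for file_path in file_list:
--         timestamp = file_path.split('.')[0].split('/')[-1].split('_')[-1]
--         newest_timestamp = max(timestamp, newest_timestamp)
--
--     for file_path in file_list:
--         if file_path.split('.')[0].split('/')[-1].split('_')[-1] == newest_timestamp:
--             newest_file_list.append(file_path)
--
--     newest_file_list.sort()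
--     return newest_file_list
-- ===== SOURCE B (Python) =====
-- def get_newest_file(file_list):
--     """Group paths by embedded timestamp in one pass, then look up the newest bucket."""
--     buckets = {}
--     for file_path in file_list:
--         ts = file_path.split('.')[0].split('/')[-1].split('_')[-1]
--         buckets.setdefault(ts, []).append(file_path)
--     newest = max([*buckets, '0'])
--     return sorted(buckets.get(newest, []))
-- ===== Notes on version B (the rewrite author's own statement) =====
-- stated objective: alternative
-- what changed: Replaces A's two full scans (running-max pass, then a filter pass re-parsing every timestamp) with a single grouping pass into a dict of timestamp buckets followed by one max-over-keys and one lookup.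
import Mathlib
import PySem

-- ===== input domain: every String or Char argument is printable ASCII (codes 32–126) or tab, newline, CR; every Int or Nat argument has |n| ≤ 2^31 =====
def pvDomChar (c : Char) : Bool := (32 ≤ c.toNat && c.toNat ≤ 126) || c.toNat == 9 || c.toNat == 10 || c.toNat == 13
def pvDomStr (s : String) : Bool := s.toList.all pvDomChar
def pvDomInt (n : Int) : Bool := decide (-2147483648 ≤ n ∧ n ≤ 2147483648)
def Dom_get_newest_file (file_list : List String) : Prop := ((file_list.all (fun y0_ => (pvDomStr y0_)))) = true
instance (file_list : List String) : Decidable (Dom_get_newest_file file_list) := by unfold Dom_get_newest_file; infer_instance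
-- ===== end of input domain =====

-- B replaces A's two scans by one dict-grouping pass plus a max-over-keys lookup (alternative structure, same cost).

-- shared helper: file_path.split('.')[0].split('/')[-1].split('_')[-1]
-- split? returns none only for an empty separator, so .getD [] is unreachable here
def pvTs (f : String) : String :=
  ((PySem.Str.split?
      (((PySem.Str.split? (((PySem.Str.split? f ".").getD []).headD "") "/").getD []).getLastD "")
      "_").getD []).getLastD ""

-- ===== PORT A =====
def get_newest_file (file_list : List String) : List String :=
  let newest_timestamp := file_list.foldl (fun nt f => max (pvTs f) nt) "0"
  let newest_file_list := file_list.foldl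
    (fun acc f => if pvTs f == newest_timestamp then acc ++ [f] else acc) []
  PySem.List.sorted newest_file_list (fun x => x) false

-- ===== PORT B =====
def get_newest_file_alt (file_list : List String) : List String :=
  let buckets : PySem.Dict String (List String) :=
    file_list.foldl (fun d f => d.modify (pvTs f) [] (fun l => l ++ [f])) PySem.Dict.empty
  let newest := match PySem.List.max? (buckets.keys ++ ["0"]) (fun x => x) with
    | some m => m
    | none => "0"   -- unreachable: the list is nonempty
  PySem.List.sorted (buckets.getD newest []) (fun x => x) false

-- ===== PRECONDITION & SPEC =====
def Spec_get_newest_file (file_list : List String) (out : List String) : Prop := out = get_newest_file_alt file_list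
instance (file_list : List String) (out : List String) : Decidable (Spec_get_newest_file file_list out) := by unfold Spec_get_newest_file; infer_instance

-- ===== CLAIM (what is proved, stated in full; the proofs are below) =====
def Claim_equal_get_newest_file : Prop := ∀ (file_list : List String), Dom_get_newest_file file_list → Spec_get_newest_file file_list (get_newest_file file_list)

-- ===== LEMMAS AND PROOFS =====

-- a running max is determined by the membership set {init} ∪ list
theorem pv_foldl_max_congr (l₁ l₂ : List String) (a₁ a₂ : String)
    (h : ∀ x, (x = a₁ ∨ x ∈ l₁) ↔ (x = a₂ ∨ x ∈ l₂)) :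
    l₁.foldl max a₁ = l₂.foldl max a₂ := by
  apply le_antisymm
  · rcases PySem.List.foldl_max_mem l₁ a₁ with h1 | h1
    · rcases (h _).1 (Or.inl h1) with h2 | h2
      · exact h2 ▸ (PySem.List.le_foldl_max l₂ a₂).1
      · exact (PySem.List.le_foldl_max l₂ a₂).2 _ h2
    · rcases (h _).1 (Or.inr h1) with h2 | h2
      · exact h2 ▸ (PySem.List.le_foldl_max l₂ a₂).1
      · exact (PySem.List.le_foldl_max l₂ a₂).2 _ h2
  · rcases PySem.List.foldl_max_mem l₂ a₂ with h1 | h1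
    · rcases (h _).2 (Or.inl h1) with h2 | h2
      · exact h2 ▸ (PySem.List.le_foldl_max l₁ a₁).1
      · exact (PySem.List.le_foldl_max l₁ a₁).2 _ h2
    · rcases (h _).2 (Or.inr h1) with h2 | h2
      · exact h2 ▸ (PySem.List.le_foldl_max l₁ a₁).1
      · exact (PySem.List.le_foldl_max l₁ a₁).2 _ h2

theorem pv_foldl_max_ts (l : List String) (a : String) :
    l.foldl (fun nt f => max (pvTs f) nt) a = (l.map pvTs).foldl max a := by
  induction l generalizing a with
  | nil => rfl
  | cons x t ih =>
    rw [List.map_cons, List.foldl_cons, List.foldl_cons, ih, max_comm]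

theorem pv_getD_group (l : List String) (d : PySem.Dict String (List String)) (c : String) :
    (l.foldl (fun d f => d.modify (pvTs f) [] (fun b => b ++ [f])) d).getD c []
      = d.getD c [] ++ l.filter (fun f => pvTs f == c) := by
  induction l generalizing d with
  | nil => simp
  | cons x t ih =>
    simp only [List.foldl, List.filter]
    rw [ih, PySem.Dict.getD_modify]
    by_cases hx : pvTs x = c
    · subst hx
      rw [if_pos rfl]
      simp
    · rw [if_neg (fun h => hx h.symm)]
      have hb : (pvTs x == c) = false := beq_eq_false_iff_ne.2 hx
      simp [hb]

theorem pv_keys_group (l : List String) :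
    (l.foldl (fun d f => d.modify (pvTs f) [] (fun b => b ++ [f]))
        (PySem.Dict.empty : PySem.Dict String (List String))).keys
      = PySem.Set.update (PySem.Dict.empty : PySem.Dict String (List String)).keys (l.map pvTs) :=
  PySem.Dict.keys_foldl_modify_key l pvTs ([] : List String) (fun _ x b => b ++ [x]) (PySem.Dict.empty : PySem.Dict String (List String))

-- ===== VERDICT (by name: the statement is the Claim_ definition above) =====
theorem get_newest_file_spec : Claim_equal_get_newest_file := by
  intro fl _
  show get_newest_file fl = get_newest_file_alt fl
  unfold get_newest_file get_newest_file_alt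
  simp only []
  have hkeys := pv_keys_group fl
  have hmem : ∀ x, x ∈ (fl.foldl (fun d f => d.modify (pvTs f) [] (fun b => b ++ [f]))
      (PySem.Dict.empty : PySem.Dict String (List String))).keys ↔ x ∈ fl.map pvTs := by
    intro x
    rw [hkeys]
    simp [PySem.Set.mem_update]
  have hnewest :
      fl.foldl (fun nt f => max (pvTs f) nt) "0"
        = (match PySem.List.max? ((fl.foldl (fun d f => d.modify (pvTs f) [] (fun b => b ++ [f]))
            (PySem.Dict.empty : PySem.Dict String (List String))).keys ++ ["0"]) (fun x => x) with
          | some m => m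
          | none => "0") := by
    rw [pv_foldl_max_ts]
    rcases hk : (fl.foldl (fun d f => d.modify (pvTs f) [] (fun b => b ++ [f]))
        (PySem.Dict.empty : PySem.Dict String (List String))).keys with _ | ⟨x, t⟩
    · simp only [hk, List.nil_append, PySem.List.max?_id_cons, List.foldl]
      refine pv_foldl_max_congr (fl.map pvTs) [] "0" "0" ?_
      intro y
      constructor
      · rintro (rfl | hy)
        · exact Or.inl rfl
        · exact absurd ((hmem y).2 hy) (by simp [hk])
      · rintro (rfl | hy)
        · exact Or.inl rfl
        · simp at hy
    · simp only [hk, List.cons_append, PySem.List.max?_id_cons]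
      apply pv_foldl_max_congr
      intro y
      have hy' : y ∈ fl.map pvTs ↔ (y = x ∨ y ∈ t) := by
        rw [← hmem y, hk]; simp
      constructor
      · rintro (rfl | hy)
        · exact Or.inr (by simp)
        · rcases hy'.1 hy with h | h
          · exact Or.inl h
          · exact Or.inr (by simp [h])
      · rintro (rfl | hy)
        · exact Or.inr (hy'.2 (Or.inl rfl))
        · rcases List.mem_append.1 hy with h | h
          · exact Or.inr (hy'.2 (Or.inr h))
          · simp at h; exact Or.inl h
  rw [← hnewest, pv_getD_group, PySem.Dict.getD_empty, List.nil_append,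
    PySem.List.foldl_append_if_eq_filter, List.nil_append]
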